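-- pv_equiv track=rewrite | github.com/PrinceSinghhub/InterviewBit-Question-Pratice | InterviewBit Question Pratice/Greater than All.py | solve
-- ===== SOURCE A (Python) =====
-- def solve(A):
--     min1=0
--     count=0
--     for i in A:
--         if(i>min1):
--             count+=1
--             min1=i
--     return count
-- ===== SOURCE B (Python) =====
-- def _go(seg, bound):
--     # divide and conquer: returns (count of prefix-maxima in seg given prior bound, max of seg)
--     if len(seg) == 1:
--         return ((1 if seg[0] > bound else 0), seg[0])
--     mid = len(seg) // 2
--     cl, ml = _go(seg[:mid], bound)
--     cr, mr = _go(seg[mid:], max(bound, ml))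
--     return (cl + cr, max(ml, mr))
--
-- def solve(A):
--     if not A:
--         return 0
--     return _go(A, 0)[0]
-- ===== Notes on version B (the rewrite author's own statement) =====
-- stated objective: alternative
-- what changed: B is a divide-and-conquer recursion: each half returns (count of new prefix-maxima given an incoming bound, maximum of the half), the right half is counted with the bound raised by the left half's maximum, and results are summed, replacing A's single fused left-to-right loop with a running max and counter.
import Mathlib
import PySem

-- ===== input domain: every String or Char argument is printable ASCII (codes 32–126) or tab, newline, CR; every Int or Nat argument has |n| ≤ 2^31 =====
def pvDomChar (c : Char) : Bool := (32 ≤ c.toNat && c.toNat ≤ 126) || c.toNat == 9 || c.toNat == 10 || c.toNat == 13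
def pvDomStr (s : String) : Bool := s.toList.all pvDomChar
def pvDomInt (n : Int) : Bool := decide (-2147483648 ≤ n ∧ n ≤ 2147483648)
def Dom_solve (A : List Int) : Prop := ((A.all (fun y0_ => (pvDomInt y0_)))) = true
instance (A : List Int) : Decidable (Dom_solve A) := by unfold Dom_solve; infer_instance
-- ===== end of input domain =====

-- B replaces A's fused running-max loop by a divide-and-conquer recursion (objective: alternative).

-- ===== PORT A =====
-- fused loop: state (min1, count), updated together
def solve (A : List Int) : Int :=
  (A.foldl (fun s i => if i > s.1 then (i, s.2 + 1) else s) ((0 : Int), (0 : Int))).2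

-- ===== PORT B =====
-- _go(seg, bound) -> (count of prefix-maxima given bound, max of seg); Python _go is never
-- called on []; the [] branch only makes the Lean function total.
def goB : List Int → Int → Int × Int
  | [], _bound => (0, 0)
  | [a], bound => (if a > bound then 1 else 0, a)
  | a :: b :: t, bound =>
    let seg := a :: b :: t
    let mid := seg.length / 2
    let l := goB (seg.take mid) bound
    let r := goB (seg.drop mid) (max bound l.2)
    (l.1 + r.1, max l.2 r.2)
termination_by seg _ => seg.length
decreasing_by
  · simp; omega
  · simp; omega

def solve_alt (A : List Int) : Int :=
  match A with
  | [] => 0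
  | _ :: _ => (goB A 0).1

-- ===== PRECONDITION & SPEC =====
def Spec_solve (A : List Int) (out : Int) : Prop := out = solve_alt A
instance (A : List Int) (out : Int) : Decidable (Spec_solve A out) := by unfold Spec_solve; infer_instance

-- ===== CLAIM (what is proved, stated in full; the proofs are below) =====
def Claim_equal_solve : Prop := ∀ (A : List Int), Dom_solve A → Spec_solve A (solve A)

-- ===== LEMMAS AND PROOFS =====

-- A's loop body
def stepA (s : Int × Int) (i : Int) : Int × Int := if i > s.1 then (i, s.2 + 1) else s

-- the state of A's fold: first component independent of count, count additive
theorem foldl_stepA_split (L : List Int) : ∀ (m c : Int),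
    L.foldl stepA (m, c) = ((L.foldl stepA (m, 0)).1, c + (L.foldl stepA (m, 0)).2) := by
  induction L with
  | nil => intro m c; simp
  | cons a t ih =>
    intro m c
    simp only [List.foldl_cons, stepA]
    by_cases h : a > m
    · simp only [if_pos h]
      rw [ih a (c + 1), ih a (0 + 1)]
      simp only [Prod.mk.injEq, true_and]
      ring
    · simp only [if_neg h]; exact ih m c

-- main invariant: goB seg b computes (count of A's fold started at (b,0), max of seg)
theorem goB_correct_aux : ∀ (n : Nat) (seg : List Int), seg.length ≤ n → seg ≠ [] → ∀ (b : Int),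
    (goB seg b).1 = (seg.foldl stepA (b, 0)).2 ∧
    (seg.foldl stepA (b, 0)).1 = max b (goB seg b).2 := by
  intro n
  induction n with
  | zero =>
    intro seg hlen hne b
    cases seg with
    | nil => exact absurd rfl hne
    | cons a t => simp at hlen
  | succ n ih =>
    intro seg hlen hne b
    match seg with
    | [a] =>
      simp only [goB, List.foldl_cons, List.foldl_nil, stepA]
      by_cases h : a > b <;> simp [h] <;> omega
    | a :: c :: t =>
      have hlen2 : (a :: c :: t).length ≥ 2 := by simp
      have hmid1 : (a :: c :: t).length / 2 ≥ 1 := by omega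
      have hmid2 : (a :: c :: t).length / 2 < (a :: c :: t).length := by omega
      have htlen : ((a :: c :: t).take ((a :: c :: t).length / 2)).length ≤ n := by
        simp only [List.length_take]
        simp at hlen ⊢; omega
      have hdlen : ((a :: c :: t).drop ((a :: c :: t).length / 2)).length ≤ n := by
        simp only [List.length_drop]
        simp at hlen ⊢; omega
      have htake : (a :: c :: t).take ((a :: c :: t).length / 2) ≠ [] := by
        intro h
        rcases List.take_eq_nil_iff.mp h with h1 | h1
        · omega
        · simp at h1
      have hdrop : (a :: c :: t).drop ((a :: c :: t).length / 2) ≠ [] := by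
        simp only [ne_eq, List.drop_eq_nil_iff]
        simp at hmid2 ⊢
        omega
      obtain ⟨ih1a, ih1b⟩ := ih _ htlen htake b
      obtain ⟨ih2a, ih2b⟩ := ih _ hdlen hdrop
        (max b (goB ((a :: c :: t).take ((a :: c :: t).length / 2)) b).2)
      have hsplit : (a :: c :: t) = (a :: c :: t).take ((a :: c :: t).length / 2) ++
          (a :: c :: t).drop ((a :: c :: t).length / 2) := (List.take_append_drop _ _).symm
      have hfold : (a :: c :: t).foldl stepA ((b : Int), (0 : Int))
          = ((a :: c :: t).drop ((a :: c :: t).length / 2)).foldl stepA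
              (((a :: c :: t).take ((a :: c :: t).length / 2)).foldl stepA (b, 0)) := by
        conv_lhs => rw [hsplit]
        rw [List.foldl_append]
      have hstate : ((a :: c :: t).take ((a :: c :: t).length / 2)).foldl stepA ((b : Int), (0 : Int))
          = (max b (goB ((a :: c :: t).take ((a :: c :: t).length / 2)) b).2,
             (goB ((a :: c :: t).take ((a :: c :: t).length / 2)) b).1) := by
        rw [Prod.ext_iff]
        exact ⟨ih1b, ih1a.symm⟩
      constructor
      · show (goB (a :: c :: t) b).1 = _
        simp only [goB]
        rw [hfold, hstate,
          foldl_stepA_split _ _ (goB ((a :: c :: t).take ((a :: c :: t).length / 2)) b).1,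
          ← ih2a]
      · show _ = max b (goB (a :: c :: t) b).2
        simp only [goB]
        rw [hfold, hstate,
          foldl_stepA_split _ _ (goB ((a :: c :: t).take ((a :: c :: t).length / 2)) b).1]
        simp only []
        rw [ih2b]
        omega

theorem goB_correct (seg : List Int) (b : Int) (hne : seg ≠ []) :
    (goB seg b).1 = (seg.foldl stepA (b, 0)).2 ∧
    (seg.foldl stepA (b, 0)).1 = max b (goB seg b).2 :=
  goB_correct_aux seg.length seg le_rfl hne b

-- ===== VERDICT (by name: the statement is the Claim_ definition above) =====
theorem solve_spec : Claim_equal_solve := by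
  intro A _
  unfold Spec_solve solve solve_alt
  match A with
  | [] => rfl
  | x :: xs =>
    have := (goB_correct (x :: xs) 0 (by simp)).1
    show (List.foldl stepA (0, 0) (x :: xs)).2 = _
    rw [this]
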